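-- pv_equiv track=rewrite | github.com/dogunyoye/advent-of-code-2015 | day08/day08.py | find_difference_new_rules
-- ===== SOURCE A (Python) =====
-- def find_difference_new_rules(data) -> int:
--     string_literals = []
--     newly_encoded_string_literals = []
--     for line in data.splitlines():
--         string_literals.append(len(line))
--         encoded = ""
--         for i in range(0, len(line)):
--             if line[i] == '"':
--                 encoded += "\\\""
--             elif line[i] == "\\":
--                 encoded += "\\\\"
--             else:
--                 encoded += line[i]
--         encoded = '"' + encoded + '"'
--         newly_encoded_string_literals.append(len(encoded))
--     return sum(newly_encoded_string_literals) - sum(string_literals)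
-- ===== SOURCE B (Python) =====
-- def find_difference_new_rules(data) -> int:
--     lines = data.splitlines()
--     return 2 * len(lines) + sum(
--         sum(c == '"' or c == '\\' for c in line) for line in lines
--     )
-- ===== Notes on version B (the rewrite author's own statement) =====
-- stated objective: simpler
-- what changed: Replaces A's per-line escaped-string building (appending escape sequences character by character and measuring lengths of two accumulated lists) with a closed-form count: each line contributes 2 plus its number of quote/backslash characters, so B never constructs any string.
import Mathlib
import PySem

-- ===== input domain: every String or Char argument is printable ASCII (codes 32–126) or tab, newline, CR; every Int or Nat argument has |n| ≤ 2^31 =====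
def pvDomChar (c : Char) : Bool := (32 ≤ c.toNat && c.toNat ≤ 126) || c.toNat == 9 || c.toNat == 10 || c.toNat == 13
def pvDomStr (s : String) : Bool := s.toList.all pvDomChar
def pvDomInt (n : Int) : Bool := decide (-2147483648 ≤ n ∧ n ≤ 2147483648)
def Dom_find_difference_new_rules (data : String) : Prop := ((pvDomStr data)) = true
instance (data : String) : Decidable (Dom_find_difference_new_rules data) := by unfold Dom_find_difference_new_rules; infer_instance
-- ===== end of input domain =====

-- B replaces A's per-line escaped-string building with a direct count: each line
-- contributes 2 plus its number of '"'/'\' characters; same value, simpler (objective: simpler).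


-- ===== PORT A =====
-- inner loop body: for i in range(0, len(line)): encoded += escape(line[i])
def pvStepA (enc : List Char) (c : Char) : List Char :=
  if c == '"' then enc ++ ['\\', '"']
  else if c == '\\' then enc ++ ['\\', '\\']
  else enc ++ [c]

def find_difference_new_rules (data : String) : Int :=
  let st :=
    (PySem.Str.splitlines data).foldl
      (fun (st : List Int × List Int) (line : String) =>
        let cs := line.toList
        let string_literals := st.1 ++ [(cs.length : Int)]
        -- pyGetD's default is unreachable: every i ∈ range(0, len(line)) is in range
        let encoded :=
          (PySem.List.pyRange 0 (cs.length : Int)).foldl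
            (fun enc j => pvStepA enc (PySem.List.pyGetD cs j ' ')) []
        let encoded2 := ['"'] ++ encoded ++ ['"']
        (string_literals, st.2 ++ [(encoded2.length : Int)]))
      ([], [])
  st.2.sum - st.1.sum

-- ===== PORT B =====
def find_difference_new_rules_alt (data : String) : Int :=
  let lines := PySem.Str.splitlines data
  2 * (lines.length : Int) +
    ((lines.map (fun line =>
        (line.toList.countP (fun c => c == '"' || c == '\\') : Int))).sum)

-- ===== PRECONDITION & SPEC =====
def Spec_find_difference_new_rules (data : String) (out : Int) : Prop := out = find_difference_new_rules_alt data
instance (data : String) (out : Int) : Decidable (Spec_find_difference_new_rules data out) := by unfold Spec_find_difference_new_rules; infer_instance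

-- ===== CLAIM (what is proved, stated in full; the proofs are below) =====
def Claim_equal_find_difference_new_rules : Prop := ∀ (data : String), Dom_find_difference_new_rules data → Spec_find_difference_new_rules data (find_difference_new_rules data)

-- ===== LEMMAS AND PROOFS =====

-- length of A's escaped string: original length plus one per '"' or '\'
theorem pvLenEsc (cs : List Char) (acc : List Char) :
    (cs.foldl pvStepA acc).length
      = acc.length + cs.length + cs.countP (fun c => c == '"' || c == '\\') := by
  induction cs generalizing acc with
  | nil => simp
  | cons c cs ih =>
    simp only [List.foldl_cons, List.countP_cons, ih, pvStepA]
    by_cases h1 : c = '"'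
    · simp [h1]; omega
    · by_cases h2 : c = '\\' <;> simp [h1, h2] <;> omega

-- A's outer loop appends one entry per line to each list
theorem pvOuterA (lines : List String) (s1 s2 : List Int) :
    (lines.foldl
      (fun (st : List Int × List Int) (line : String) =>
        let cs := line.toList
        let string_literals := st.1 ++ [(cs.length : Int)]
        let encoded :=
          (PySem.List.pyRange 0 (cs.length : Int)).foldl
            (fun enc j => pvStepA enc (PySem.List.pyGetD cs j ' ')) []
        let encoded2 := ['"'] ++ encoded ++ ['"']
        (string_literals, st.2 ++ [(encoded2.length : Int)]))
      (s1, s2))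
    = (s1 ++ lines.map (fun line => (line.toList.length : Int)),
       s2 ++ lines.map (fun line =>
         (2 + line.toList.length
            + line.toList.countP (fun c => c == '"' || c == '\\') : Int))) := by
  induction lines generalizing s1 s2 with
  | nil => simp
  | cons l ls ih =>
    simp only [List.foldl_cons, List.map_cons]
    rw [ih]
    have h := PySem.List.foldl_pyRange_zero_pyGetD' l.toList ' ' pvStepA []
    have hx : ((['\"'] ++ l.toList.foldl pvStepA [] ++ ['\"']).length : Int)
        = 2 + (l.toList.length : Int)
          + (l.toList.countP (fun c => c == '\"' || c == '\\') : Int) := by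
      simp [pvLenEsc]
      ring
    rw [Prod.mk.injEq]
    refine ⟨by simp, ?_⟩
    rw [h, hx]
    simp

theorem pvSumDiff (lines : List String) :
    (lines.map (fun line =>
       (2 + line.toList.length
          + line.toList.countP (fun c => c == '"' || c == '\\') : Int))).sum
    - (lines.map (fun line => (line.toList.length : Int))).sum
    = 2 * (lines.length : Int)
      + (lines.map (fun line =>
          (line.toList.countP (fun c => c == '"' || c == '\\') : Int))).sum := by
  induction lines with
  | nil => simp
  | cons l ls ih =>
    simp only [List.map_cons, List.sum_cons, List.length_cons]
    push_cast
    omega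

-- ===== VERDICT (by name: the statement is the Claim_ definition above) =====
theorem find_difference_new_rules_spec : Claim_equal_find_difference_new_rules := by
  intro data _
  unfold Spec_find_difference_new_rules find_difference_new_rules find_difference_new_rules_alt
  simp only [pvOuterA, List.nil_append]
  exact pvSumDiff (PySem.Str.splitlines data)
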